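-- pv_equiv track=rewrite | github.com/Lelikov/absolufy-imports | absolufy_imports/__main__.py | _find_relative_depth
-- ===== SOURCE A (Python) =====
-- from collections.abc import Iterable, MutableMapping, Sequence
--
-- def _find_relative_depth(parts: Sequence[str], module: str) -> int:
--     depth = 0
--     for n, _ in enumerate(parts, start=1):
--         if module.startswith(".".join(parts[:n])):
--             depth += 1
--         else:
--             break
--     return depth
-- ===== SOURCE B (Python) =====
-- def _find_relative_depth(parts, module):
--     # ".".join(parts[:n]) is always a string prefix of ".".join(parts[:n+1]), so the
--     # predicate "module starts with the dotted join of the first n parts" is downward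
--     # closed in n; A's break-at-first-failure count is therefore the LARGEST n for
--     # which it holds, and we can binary-search for it instead of scanning linearly.
--     lo, hi = 0, len(parts)
--     while lo < hi:
--         mid = (lo + hi + 1) // 2
--         if module.startswith(".".join(parts[:mid])):
--             lo = mid
--         else:
--             hi = mid - 1
--     return lo
-- ===== Notes on version B (the rewrite author's own statement) =====
-- stated objective: alternative
-- what changed: B binary-searches for the largest n with module.startswith('.'.join(parts[:n])) -- valid because that predicate is downward closed in n -- instead of A's linear scan that counts successes until the first failure.
import Mathlib
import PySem

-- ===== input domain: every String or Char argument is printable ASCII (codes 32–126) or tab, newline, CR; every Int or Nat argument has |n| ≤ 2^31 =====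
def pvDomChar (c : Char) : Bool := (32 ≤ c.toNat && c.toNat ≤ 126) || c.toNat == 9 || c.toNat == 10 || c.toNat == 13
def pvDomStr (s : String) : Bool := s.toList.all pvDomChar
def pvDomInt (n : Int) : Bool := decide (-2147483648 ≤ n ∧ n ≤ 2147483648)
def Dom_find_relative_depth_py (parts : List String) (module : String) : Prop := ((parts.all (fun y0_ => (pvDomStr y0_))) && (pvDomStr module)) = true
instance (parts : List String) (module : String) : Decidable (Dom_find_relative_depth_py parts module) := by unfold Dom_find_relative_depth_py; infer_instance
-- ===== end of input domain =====

-- B binary-searches for the largest n with module.startswith(".".join(parts[:n]))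
-- (the predicate is downward closed in n) instead of A's linear scan.

-- ===== PORT A =====
-- 'for n, _ in enumerate(parts, start=1): if module.startswith(".".join(parts[:n])): depth += 1 else: break'
def pvALoop (parts : List String) (module : String) (n : Nat) (depth : Int) : Int :=
  if _h : n ≤ parts.length then
    if PySem.Str.startswith module (PySem.Str.join "." (PySem.List.slice parts none (some (n : Int)))) then
      pvALoop parts module (n + 1) (depth + 1)
    else depth
  else depth
termination_by parts.length + 1 - n

def find_relative_depth_py (parts : List String) (module : String) : Int :=
  pvALoop parts module 1 0

-- ===== PORT B =====
-- Source B's while loop: lo, hi are nonnegative Python ints (lo starts at 0, hi at len(parts)),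
-- so they are carried as Nat; '(lo + hi + 1) // 2' on nonnegative ints is Nat division.
def pvBSearch (parts : List String) (module : String) (lo hi : Nat) : Nat :=
  if _h : lo < hi then
    let mid := (lo + hi + 1) / 2
    if PySem.Str.startswith module (PySem.Str.join "." (PySem.List.slice parts none (some (mid : Int)))) then
      pvBSearch parts module mid hi
    else
      pvBSearch parts module lo (mid - 1)
  else lo
termination_by hi - lo
decreasing_by all_goals omega

def find_relative_depth_py_alt (parts : List String) (module : String) : Int :=
  (pvBSearch parts module 0 parts.length : Int)

-- ===== PRECONDITION & SPEC =====
def Spec_find_relative_depth_py (parts : List String) (module : String) (out : Int) : Prop := out = find_relative_depth_py_alt parts module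
instance (parts : List String) (module : String) (out : Int) : Decidable (Spec_find_relative_depth_py parts module out) := by unfold Spec_find_relative_depth_py; infer_instance

-- ===== CLAIM (what is proved, stated in full; the proofs are below) =====
def Claim_equal_find_relative_depth_py : Prop := ∀ (parts : List String) (module : String), Dom_find_relative_depth_py parts module → Spec_find_relative_depth_py parts module (find_relative_depth_py parts module)

-- ===== LEMMAS AND PROOFS =====

-- the check both programs make, as a predicate of n
def pvP (parts : List String) (module : String) (n : Nat) : Bool :=
  PySem.Str.startswith module (PySem.Str.join "." (PySem.List.slice parts none (some (n : Int))))

-- the char-list form of the check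
theorem pvP_iff (parts : List String) (module : String) (n : Nat) :
    pvP parts module n = true ↔
      PySem.Chars.join ['.'] ((parts.take n).map String.toList) <+: module.toList := by
  unfold pvP
  rw [PySem.Str.startswith_eq, PySem.Str.toList_join, PySem.List.slice_to_natCast,
    show ("." : String).toList = ['.'] by decide, PySem.Chars.startswith_iff]

-- joining a snoc appends 'sep ++ p' to the join of the nonempty front
theorem pv_join_snoc (sep p a : List Char) (t : List (List Char)) :
    PySem.Chars.join sep (a :: (t ++ [p])) = PySem.Chars.join sep (a :: t) ++ sep ++ p := by
  induction t generalizing a with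
  | nil => simp [PySem.Chars.join_cons_cons, PySem.Chars.join_singleton]
  | cons b t' ih =>
    simp only [List.cons_append, PySem.Chars.join_cons_cons]
    rw [ih b]
    simp [List.append_assoc]

-- the joined prefix only grows with n
theorem pv_join_take_prefix (parts : List String) (n : Nat) :
    PySem.Chars.join ['.'] ((parts.take n).map String.toList) <+:
      PySem.Chars.join ['.'] ((parts.take (n + 1)).map String.toList) := by
  rw [List.take_add_one]
  cases hg : parts[n]? with
  | none => simp
  | some p =>
    simp only [Option.toList_some]
    cases hc : parts.take n with
    | nil => simp [PySem.Chars.join_nil]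
    | cons a t =>
      simp only [List.cons_append, List.map_cons, List.map_append, List.map_nil]
      rw [pv_join_snoc]
      exact ⟨['.'] ++ p.toList, by simp [List.append_assoc]⟩

-- the predicate is downward closed
theorem pv_mono (parts : List String) (module : String) (m : Nat) :
    ∀ n, m ≤ n → pvP parts module n = true → pvP parts module m = true := by
  intro n
  induction n with
  | zero => intro hmn h; simpa [Nat.le_zero.mp hmn] using h
  | succ k ih =>
    intro hmn h
    rcases Nat.lt_succ_iff_lt_or_eq.mp (Nat.lt_succ_of_le hmn) with h' | h'
    · exact ih (Nat.lt_succ_iff.mp h')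
        ((pvP_iff ..).mpr ((pv_join_take_prefix parts k).trans ((pvP_iff ..).mp h)))
    · exact h' ▸ h

-- P 0 always holds (the empty join is a prefix of everything)
theorem pv_P_zero (parts : List String) (module : String) : pvP parts module 0 = true := by
  rw [pvP_iff]; simp [PySem.Chars.join_nil]

-- the largest n ≤ len(parts) satisfying the check
def pvM (parts : List String) (module : String) : Nat :=
  Nat.findGreatest (fun n => pvP parts module n = true) parts.length

theorem pvM_P (parts : List String) (module : String) (h : pvM parts module ≠ 0) :
    pvP parts module (pvM parts module) = true :=
  Nat.findGreatest_of_ne_zero rfl h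

-- A's loop computes pvM
theorem pv_A_char (parts : List String) (module : String) (n : Nat) (h1 : 1 ≤ n)
    (hle : n ≤ parts.length + 1) (hall : ∀ m < n, pvP parts module m = true) :
    pvALoop parts module n ((n : Int) - 1) = ((pvM parts module : Nat) : Int) := by
  rw [pvALoop]
  by_cases hn : n ≤ parts.length
  · rw [dif_pos hn]
    by_cases hp : pvP parts module n = true
    · have hp' := hp
      unfold pvP at hp'
      rw [if_pos hp']
      have hrec := pv_A_char parts module (n + 1) (by omega) (by omega)
        (by intro m hm
            rcases Nat.lt_succ_iff_lt_or_eq.mp hm with h' | h'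
            · exact hall m h'
            · exact h' ▸ hp)
      rw [show ((n : Int) - 1 + 1) = (((n + 1 : Nat) : Int) - 1) by push_cast; ring]
      exact hrec
    · have hp' := hp
      unfold pvP at hp'
      rw [if_neg hp']
      have hub : pvM parts module ≤ n - 1 := by
        by_contra hc
        push Not at hc
        have hMle : pvM parts module ≤ parts.length := Nat.findGreatest_le _
        have hPM : pvP parts module (pvM parts module) = true :=
          pvM_P parts module (by omega)
        exact hp (pv_mono parts module n _ (by omega) hPM)
      have hlb : n - 1 ≤ pvM parts module :=
        Nat.le_findGreatest (by omega) (hall (n - 1) (by omega))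
      have heq : pvM parts module = n - 1 := le_antisymm hub hlb
      rw [heq]; omega
  · rw [dif_neg hn]
    have heq : pvM parts module = parts.length :=
      Nat.findGreatest_eq (hall parts.length (by omega))
    rw [heq]; omega
termination_by parts.length + 1 - n
decreasing_by omega

-- B's binary search computes pvM
theorem pv_B_char (parts : List String) (module : String) (lo hi : Nat) (hlh : lo ≤ hi)
    (hhl : hi ≤ parts.length) (hPlo : pvP parts module lo = true)
    (hMhi : pvM parts module ≤ hi) : pvBSearch parts module lo hi = pvM parts module := by
  rw [pvBSearch]
  by_cases h : lo < hi
  · rw [dif_pos h]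
    simp only
    have hmlo : lo < (lo + hi + 1) / 2 := by omega
    have hmhi : (lo + hi + 1) / 2 ≤ hi := by omega
    by_cases hp : pvP parts module ((lo + hi + 1) / 2) = true
    · have hp' := hp
      unfold pvP at hp'
      rw [if_pos hp']
      exact pv_B_char parts module ((lo + hi + 1) / 2) hi hmhi hhl hp hMhi
    · have hp' := hp
      unfold pvP at hp'
      rw [if_neg hp']
      have hMlt : pvM parts module < (lo + hi + 1) / 2 := by
        by_contra hc
        push Not at hc
        have hMle : pvM parts module ≤ parts.length := Nat.findGreatest_le _
        have hPM : pvP parts module (pvM parts module) = true :=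
          pvM_P parts module (by omega)
        exact hp (pv_mono parts module _ _ hc hPM)
      exact pv_B_char parts module lo ((lo + hi + 1) / 2 - 1) (by omega) (by omega) hPlo
        (by omega)
  · rw [dif_neg h]
    have hlo : lo = hi := by omega
    have : lo ≤ pvM parts module := Nat.le_findGreatest (by omega) hPlo
    omega
termination_by hi - lo
decreasing_by all_goals omega

-- ===== VERDICT (by name: the statement is the Claim_ definition above) =====
theorem find_relative_depth_py_spec : Claim_equal_find_relative_depth_py := by
  intro parts module _
  unfold Spec_find_relative_depth_py find_relative_depth_py find_relative_depth_py_alt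
  rw [pv_B_char parts module 0 parts.length (Nat.zero_le _) le_rfl
      (pv_P_zero parts module) (Nat.findGreatest_le _)]
  have := pv_A_char parts module 1 le_rfl (by omega)
    (by intro m hm; interval_cases m; exact pv_P_zero parts module)
  simpa using this
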